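-- pv_equiv track=rewrite | github.com/nopparujp/2110101 | grader/2566_2_Quiz_3_2/main.py | count_friends
-- ===== SOURCE A (Python) =====
-- def count_friends(data, names):
--     d = dict()
--     for a, b in data:
--         if a not in d:
--             d[a] = set()
--         d[a].add(b)
--         if b not in d:
--             d[b] = set()
--         d[b].add(a)
--     result = []
--     for name in names:
--         if name not in d:
--             result.append((name, 0))
--         else:
--             result.append(((name), len(d[name])))
--     return sorted(result)
-- ===== SOURCE B (Python) =====
-- def count_friends(data, names):
--     result = []
--     for name in names:
--         friends = set()
--         for a, b in data:
--             if a == name: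
--                 friends.add(b)
--             if b == name:
--                 friends.add(a)
--         result.append((name, len(friends)))
--     return sorted(result)
-- ===== Notes on version B (the rewrite author's own statement) =====
-- stated objective: alternative
-- what changed: Replaces the adjacency dict-of-sets index with a direct per-query scan: for each queried name one pass over data collects its distinct neighbours into a fresh set, with no dict at all.
import Mathlib
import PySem

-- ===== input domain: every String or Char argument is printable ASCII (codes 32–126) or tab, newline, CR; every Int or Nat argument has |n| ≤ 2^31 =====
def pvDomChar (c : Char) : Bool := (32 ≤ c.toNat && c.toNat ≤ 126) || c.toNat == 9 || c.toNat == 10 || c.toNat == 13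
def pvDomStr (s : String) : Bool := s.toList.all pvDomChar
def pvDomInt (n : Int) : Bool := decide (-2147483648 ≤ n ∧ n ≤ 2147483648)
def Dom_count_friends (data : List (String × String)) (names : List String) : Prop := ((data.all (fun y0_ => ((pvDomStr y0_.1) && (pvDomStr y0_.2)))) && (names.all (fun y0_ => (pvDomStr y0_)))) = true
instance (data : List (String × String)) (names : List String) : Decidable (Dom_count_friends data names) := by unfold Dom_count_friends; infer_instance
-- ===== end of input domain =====

-- B replaces A's adjacency dict-of-sets index by a per-queried-name scan of data; same results, alternative shape.

-- ===== PORT A =====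
-- one iteration of A's 'for a, b in data' loop building the dict of neighbour sets
def cfStep (d : PySem.Dict String (PySem.Set String)) (p : String × String) :
    PySem.Dict String (PySem.Set String) :=
  let d1 := if d.contains p.1 then d else d.insert p.1 PySem.Set.empty
  let d2 := d1.modify p.1 PySem.Set.empty (fun s => PySem.Set.add s p.2)
  let d3 := if d2.contains p.2 then d2 else d2.insert p.2 PySem.Set.empty
  d3.modify p.2 PySem.Set.empty (fun s => PySem.Set.add s p.1)

def count_friends (data : List (String × String)) (names : List String) : List (String × Int) :=
  let d := data.foldl cfStep PySem.Dict.empty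
  let result := names.foldl (fun r name =>
    if d.contains name = false then r ++ [(name, (0 : Int))]
    else r ++ [(name, ((d.getD name PySem.Set.empty).length : Int))]) []
  PySem.List.sorted2 result (fun p => p.1) (fun p => p.2)

-- ===== PORT B =====
-- B's inner loop body: add b when a == name, add a when b == name
def cfAdd (name : String) (s : PySem.Set String) (p : String × String) : PySem.Set String :=
  let s1 := if p.1 == name then PySem.Set.add s p.2 else s
  if p.2 == name then PySem.Set.add s1 p.1 else s1

def cfFriends (data : List (String × String)) (name : String) : PySem.Set String :=
  data.foldl (cfAdd name) PySem.Set.empty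

def count_friends_alt (data : List (String × String)) (names : List String) : List (String × Int) :=
  let result := names.foldl (fun r name =>
    r ++ [(name, ((cfFriends data name).length : Int))]) []
  PySem.List.sorted2 result (fun p => p.1) (fun p => p.2)

-- ===== PRECONDITION & SPEC =====
def Spec_count_friends (data : List (String × String)) (names : List String) (out : List (String × Int)) : Prop := out = count_friends_alt data names
instance (data : List (String × String)) (names : List String) (out : List (String × Int)) : Decidable (Spec_count_friends data names out) := by unfold Spec_count_friends; infer_instance

-- ===== CLAIM (what is proved, stated in full; the proofs are below) =====
def Claim_equal_count_friends : Prop := ∀ (data : List (String × String)) (names : List String), Dom_count_friends data names → Spec_count_friends data names (count_friends data names)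

-- ===== LEMMAS AND PROOFS =====

lemma set_add_isEmpty (s : PySem.Set String) (x : String) :
    (PySem.Set.add s x).isEmpty = false := by
  cases s with
  | nil => simp [PySem.Set.add, PySem.Set.contains]
  | cons y t =>
    simp only [PySem.Set.add]
    split <;> simp

-- one step of A's dict loop, seen through a single queried name (the stored set is nonempty iff the key is present)
lemma step_getD (d : PySem.Dict String (PySem.Set String)) (a b name : String)
    (h2 : d.contains name = !(d.getD name PySem.Set.empty).isEmpty) :
    (cfStep d (a, b)).getD name PySem.Set.empty =
      cfAdd name (d.getD name PySem.Set.empty) (a, b) := by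
  have hempty : d.contains name = false → d.getD name PySem.Set.empty = [] := by
    intro h
    rw [h] at h2
    cases hh : d.getD name PySem.Set.empty with
    | nil => rfl
    | cons x t => rw [hh] at h2; simp at h2
  simp only [cfStep, cfAdd]
  by_cases ha : a = name <;> by_cases hb : b = name <;> subst_vars <;>
    (try have ha2 : ¬ name = a := fun h => ha h.symm) <;>
    (try have hb2 : ¬ name = b := fun h => hb h.symm) <;>
    split_ifs <;>
    simp_all [PySem.Dict.getD_modify, PySem.Dict.getD_insert,
      PySem.Dict.contains_modify, PySem.Dict.contains_insert]

lemma step_contains (d : PySem.Dict String (PySem.Set String)) (a b name : String)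
    (h2 : d.contains name = !(d.getD name PySem.Set.empty).isEmpty) :
    (cfStep d (a, b)).contains name =
      !(cfAdd name (d.getD name PySem.Set.empty) (a, b)).isEmpty := by
  simp only [cfStep, cfAdd]
  by_cases ha : a = name <;> by_cases hb : b = name <;> subst_vars <;>
    (try have ha2 : ¬ name = a := fun h => ha h.symm) <;>
    (try have hb2 : ¬ name = b := fun h => hb h.symm) <;>
    split_ifs <;>
    simp_all [PySem.Dict.contains_modify, PySem.Dict.contains_insert, set_add_isEmpty] <;>
    simp [beq_eq_false_iff_ne.mpr ha2, beq_eq_false_iff_ne.mpr hb2]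

-- the invariant carried over the whole data loop
lemma cf_inv (data : List (String × String)) (name : String) :
    ∀ (d : PySem.Dict String (PySem.Set String)),
    d.contains name = !(d.getD name PySem.Set.empty).isEmpty →
    (data.foldl cfStep d).getD name PySem.Set.empty =
      data.foldl (cfAdd name) (d.getD name PySem.Set.empty) ∧
    (data.foldl cfStep d).contains name =
      !(data.foldl (cfAdd name) (d.getD name PySem.Set.empty)).isEmpty := by
  induction data with
  | nil => intro d h2; exact ⟨rfl, h2⟩
  | cons p rest ih =>
    intro d h2
    obtain ⟨a, b⟩ := p
    have hg := step_getD d a b name h2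
    have hc := step_contains d a b name h2
    have hinv : (cfStep d (a, b)).contains name =
        !((cfStep d (a, b)).getD name PySem.Set.empty).isEmpty := by rw [hg, hc]
    have := ih (cfStep d (a, b)) hinv
    rw [hg] at this
    simpa [List.foldl_cons] using this

lemma cf_main (data : List (String × String)) (name : String) :
    (data.foldl cfStep PySem.Dict.empty).getD name PySem.Set.empty = cfFriends data name ∧
    (data.foldl cfStep PySem.Dict.empty).contains name = !(cfFriends data name).isEmpty := by
  have h := cf_inv data name PySem.Dict.empty
    (by simp [PySem.Dict.contains_empty, PySem.Dict.getD_empty, PySem.Set.empty])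
  simpa [cfFriends, PySem.Dict.getD_empty, PySem.Set.empty] using h

-- ===== VERDICT (by name: the statement is the Claim_ definition above) =====
theorem count_friends_spec : Claim_equal_count_friends := by
  intro data names _
  unfold Spec_count_friends
  simp only [count_friends, count_friends_alt]
  congr 1
  apply PySem.List.foldl_congr_mem
  intro acc name _
  obtain ⟨h1, h2⟩ := cf_main data name
  by_cases hc : (data.foldl cfStep PySem.Dict.empty).contains name = false
  · rw [hc] at h2
    have hempty : (cfFriends data name).isEmpty = true := by
      cases h : (cfFriends data name).isEmpty
      · rw [h] at h2; simp at h2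
      · rfl
    rw [List.isEmpty_iff.mp hempty]
    simp [hc]
  · simp only [hc, h1]
    simp
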